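-- pv_equiv track=rewrite | github.com/DomincDootson/Data_Science_Projects | New_Vegan_Book/Recipe.py | remove_html_tags
-- ===== SOURCE A (Python) =====
-- def remove_html_tags(string):
-- 	split_string, string =  [char for char in string], '' # you don't need to split it
-- 	is_in_tag = False
--
-- 	for char in split_string:
--
-- 		if (char == '<' or is_in_tag):
-- 			is_in_tag = True
-- 			if char == '>':
-- 				is_in_tag = False
-- 		else:
-- 			string += char
--
-- 	return string
-- ===== SOURCE B (Python) =====
-- def remove_html_tags(string):
--     out = []
--     i = 0
--     n = len(string)
--     while i < n:
--         j = string.find('<', i)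
--         if j == -1:
--             out.append(string[i:])
--             break
--         out.append(string[i:j])
--         k = string.find('>', j + 1)
--         i = n if k == -1 else k + 1
--     return ''.join(out)
-- ===== Notes on version B (the rewrite author's own statement) =====
-- stated objective: faster
-- what changed: Replaces A's per-character boolean state machine (with quadratic string +=) with chunked scanning: B jumps between tags with str.find, slices whole untagged segments, and joins them once at the end.
import Mathlib
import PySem

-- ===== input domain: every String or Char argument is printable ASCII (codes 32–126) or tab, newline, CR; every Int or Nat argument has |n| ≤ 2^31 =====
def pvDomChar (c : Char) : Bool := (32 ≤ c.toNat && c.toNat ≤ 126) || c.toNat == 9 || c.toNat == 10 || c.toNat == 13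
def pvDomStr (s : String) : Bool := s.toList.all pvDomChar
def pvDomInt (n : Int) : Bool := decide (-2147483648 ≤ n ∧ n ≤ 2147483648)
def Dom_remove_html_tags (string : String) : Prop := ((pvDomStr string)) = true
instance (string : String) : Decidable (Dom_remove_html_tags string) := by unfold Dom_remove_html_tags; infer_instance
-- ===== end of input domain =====

-- B replaces A's per-character boolean state machine with chunked scanning (copy the
-- segment up to the next '<', then skip through the next '>'); return values only,
-- same on all inputs.

-- ===== PORT A =====
-- A: single pass over the characters with an is_in_tag flag; builds the result by appending.
def remove_html_tags (string : String) : String :=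
  let split_string := string.toList
  let res := split_string.foldl
    (fun (st : List Char × Bool) char =>
      if char == '<' || st.2 then
        (st.1, char != '>')
      else
        (st.1 ++ [char], st.2))
    ([], false)
  String.mk res.1

-- ===== PORT B =====
-- B-side helper: one chunk = copy everything before the next '<' (string.find('<', i)),
-- then skip through the matching '>' (string.find('>', j+1)); recurse on the remainder.
def altChunks (l : List Char) : List Char :=
  match h : l.dropWhile (fun c => c != '<') with
  | [] => l
  | _ :: r =>
      l.takeWhile (fun c => c != '<') ++ altChunks ((r.dropWhile (fun c => c != '>')).drop 1)
termination_by l.length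
decreasing_by
  have h1 : (l.dropWhile (fun c => c != '<')).length ≤ l.length := List.length_dropWhile_le _ _
  have h2 : (r.dropWhile (fun c => c != '>')).length ≤ r.length := List.length_dropWhile_le _ _
  simp [h] at h1
  have h3 : ((r.dropWhile (fun c => c != '>')).drop 1).length ≤ (r.dropWhile (fun c => c != '>')).length :=
    by simp
  omega

def remove_html_tags_alt (string : String) : String :=
  String.mk (altChunks string.toList)

-- ===== PRECONDITION & SPEC =====
def Spec_remove_html_tags (string : String) (out : String) : Prop := out = remove_html_tags_alt string
instance (string : String) (out : String) : Decidable (Spec_remove_html_tags string out) := by unfold Spec_remove_html_tags; infer_instance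

-- ===== CLAIM (what is proved, stated in full; the proofs are below) =====
def Claim_equal_remove_html_tags : Prop := ∀ (string : String), Dom_remove_html_tags string → Spec_remove_html_tags string (remove_html_tags string)

-- ===== LEMMAS AND PROOFS =====

-- A's step function, named for the proofs.
def stepA (st : List Char × Bool) (char : Char) : List Char × Bool :=
  if char == '<' || st.2 then (st.1, char != '>') else (st.1 ++ [char], st.2)

lemma foldl_stepA_eq (l : List Char) (acc : List Char) :
    List.foldl stepA (acc, false) l =
      List.foldl (fun (st : List Char × Bool) char =>
        if char == '<' || st.2 then (st.1, char != '>') else (st.1 ++ [char], st.2))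
        (acc, false) l := rfl

-- while in-tag, A skips characters up to and including the first '>'
lemma skip_phase (l : List Char) (acc : List Char) :
    (List.foldl stepA (acc, true) l).1 =
      (List.foldl stepA (acc, false) ((l.dropWhile (fun c => c != '>')).drop 1)).1 := by
  induction l generalizing acc with
  | nil => simp
  | cons c rest ih =>
      by_cases hc : c = '>'
      · subst hc
        simp [stepA, List.dropWhile]
      · have : (c != '>') = true := by simp [hc]
        simp [stepA, List.dropWhile, this, ih]

lemma altChunks_of_nil (l : List Char) (h : l.dropWhile (fun c => c != '<') = []) :
    altChunks l = l := by
  rw [altChunks]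
  split
  · rfl
  · rename_i head r heq
    rw [h] at heq
    cases heq

lemma altChunks_of_cons (l : List Char) (x : Char) (r : List Char)
    (h : l.dropWhile (fun c => c != '<') = x :: r) :
    altChunks l =
      l.takeWhile (fun c => c != '<') ++ altChunks ((r.dropWhile (fun c => c != '>')).drop 1) := by
  rw [altChunks]
  split
  · rename_i heq
    rw [h] at heq
    cases heq
  · rename_i head r' heq
    rw [h] at heq
    injection heq with h1 h2
    subst h2
    rfl

lemma altChunks_nil : altChunks [] = [] := altChunks_of_nil [] rfl

lemma altChunks_lt (rest : List Char) :
    altChunks ('<' :: rest) = altChunks ((rest.dropWhile (fun c => c != '>')).drop 1) := by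
  have h : ('<' :: rest).dropWhile (fun c => c != '<') = '<' :: rest := by
    simp [List.dropWhile]
  rw [altChunks_of_cons _ _ _ h]
  simp [List.takeWhile]

lemma altChunks_cons (c : Char) (hc : c ≠ '<') (rest : List Char) :
    altChunks (c :: rest) = c :: altChunks rest := by
  have hcb : (c != '<') = true := by simp [hc]
  have hd : (c :: rest).dropWhile (fun c => c != '<') = rest.dropWhile (fun c => c != '<') := by
    simp [List.dropWhile, hcb]
  cases hdw : rest.dropWhile (fun c => c != '<') with
  | nil =>
      rw [altChunks_of_nil (c :: rest) (by rw [hd, hdw]), altChunks_of_nil rest hdw]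
  | cons x r =>
      rw [altChunks_of_cons (c :: rest) x r (by rw [hd, hdw]), altChunks_of_cons rest x r hdw]
      simp [List.takeWhile, hcb]

lemma main_eq (l : List Char) (acc : List Char) :
    (List.foldl stepA (acc, false) l).1 = acc ++ altChunks l := by
  match l with
  | [] => simp [altChunks_nil]
  | c :: rest =>
      by_cases hc : c = '<'
      · subst hc
        have hstep : stepA (acc, false) '<' = (acc, true) := by simp [stepA]
        rw [List.foldl_cons, hstep, skip_phase, main_eq, altChunks_lt]
      · have hstep : stepA (acc, false) c = (acc ++ [c], false) := by
          simp [stepA]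
          intro h; exact absurd h hc
        rw [List.foldl_cons, hstep, main_eq, altChunks_cons c hc]
        simp
  termination_by l.length
  decreasing_by
    · have h1 := List.length_dropWhile_le (fun c => c != '>') rest
      simp; omega
    · simp

-- ===== VERDICT (by name: the statement is the Claim_ definition above) =====
theorem remove_html_tags_spec : Claim_equal_remove_html_tags := by
  intro s _
  unfold Spec_remove_html_tags remove_html_tags remove_html_tags_alt
  simp only
  rw [← foldl_stepA_eq, main_eq]
  simp
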